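-- pv_equiv track=rewrite | github.com/ewgdg/dotman | src/dotman/profiles.py | compute_profile_heights
-- ===== SOURCE A (Python) =====
-- from collections.abc import Mapping, Sequence
--
-- def compute_profile_heights(profiles: Mapping[str, Sequence[str]]) -> dict[str, int]:
--     cache: dict[str, int] = {}
--
--     def visit(profile_name: str, stack: tuple[str, ...]) -> int:
--         if profile_name in cache:
--             return cache[profile_name]
--         if profile_name in stack:
--             cycle = " -> ".join([*stack, profile_name])
--             raise ValueError(f"profile include cycle detected: {cycle}")
--         includes = tuple(profiles.get(profile_name, ()))
--         if not includes:
--             cache[profile_name] = 0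
--             return 0
--         height = 1 + max(visit(include_name, (*stack, profile_name)) for include_name in includes)
--         cache[profile_name] = height
--         return height
--
--     for profile_name in profiles:
--         visit(profile_name, ())
--     return cache
-- ===== SOURCE B (Python) =====
-- def compute_profile_heights(profiles):
--     cache = {}
--     for root in profiles:
--         if root in cache:
--             continue
--         # explicit-stack DFS: frames of [name, pending includes, best child height so far]
--         frames = [[root, list(profiles.get(root, ())), -1]]
--         while frames:
--             name, pending, best = frames[-1]
--             if pending:
--                 child = pending.pop(0)
--                 if child in cache:
--                     frames[-1][2] = max(best, cache[child])
--                 elif any(fr[0] == child for fr in frames):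
--                     path = [fr[0] for fr in frames]
--                     cycle = " -> ".join(path + [child])
--                     raise ValueError(f"profile include cycle detected: {cycle}")
--                 else:
--                     frames.append([child, list(profiles.get(child, ())), -1])
--             else:
--                 frames.pop()
--                 height = best + 1
--                 cache[name] = height
--                 if frames:
--                     frames[-1][2] = max(frames[-1][2], height)
--     return cache
-- ===== Notes on version B (the rewrite author's own statement) =====
-- stated objective: alternative
-- what changed: A's recursive memoized DFS (per-call cycle stack, height = 1 + max over recursive calls) is replaced by an explicit-stack iterative DFS: a work list of (name, pending includes, best child height) frames with a running max folded in post-order, visiting roots and includes in the same order so cache insertion order and the cycle error match exactly.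
import Mathlib
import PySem

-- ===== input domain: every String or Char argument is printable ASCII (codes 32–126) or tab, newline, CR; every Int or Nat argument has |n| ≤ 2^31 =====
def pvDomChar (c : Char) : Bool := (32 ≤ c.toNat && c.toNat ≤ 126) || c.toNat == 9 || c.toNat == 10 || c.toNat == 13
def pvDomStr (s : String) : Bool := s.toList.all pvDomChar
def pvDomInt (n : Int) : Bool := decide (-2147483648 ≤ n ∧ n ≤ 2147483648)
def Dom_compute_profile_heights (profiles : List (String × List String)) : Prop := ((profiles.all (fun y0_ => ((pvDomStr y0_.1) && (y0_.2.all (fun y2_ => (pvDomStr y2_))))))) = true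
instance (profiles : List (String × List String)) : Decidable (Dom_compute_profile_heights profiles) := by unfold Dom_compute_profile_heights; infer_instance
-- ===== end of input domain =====

-- B replaces A's recursive memoized DFS by an explicit-stack iterative DFS (work-list of
-- (name, pending includes, best-child-height) frames); same visit order, same cache order.

-- profiles.get(name, ()) — first-match association-list lookup on the input dict
def pvLk (profiles : List (String × List String)) (n : String) : List String :=
  match profiles.find? (fun p => p.1 == n) with
  | some p => p.2
  | none => []

-- ===== PORT A =====
-- max(visit(i) for i in includes): left-to-right evaluation threading the cache, running max
def pvMaxFold (visit : String → PySem.Dict String Int → Option (PySem.Dict String Int × Int)) :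
    List String → PySem.Dict String Int → Option (PySem.Dict String Int × Int)
  | [], _ => none
  | [x], cache => visit x cache
  | x :: y :: rest, cache =>
    match visit x cache with
    | none => none
    | some (c1, v) =>
      match pvMaxFold visit (y :: rest) c1 with
      | none => none
      | some (c2, m) => some (c2, max v m)

-- A's recursive visit; it raises ValueError on an include cycle: the port returns none there
-- (unreachable under Pre_).  The fuel only makes the recursion structural; the recursion depth
-- is bounded by the number of profiles (stack entries are distinct keys).
def pvVisitA (profiles : List (String × List String)) :
    Nat → String → List String → PySem.Dict String Int → Option (PySem.Dict String Int × Int)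
  | 0, _, _, _ => none
  | fuel+1, name, stack, cache =>
    match cache.get? name with
    | some v => some (cache, v)
    | none =>
      if name ∈ stack then none  -- raise ValueError (cycle)
      else
        let includes := pvLk profiles name
        if includes = [] then some (cache.insert name 0, 0)
        else
          match pvMaxFold (fun x c => pvVisitA profiles fuel x (stack ++ [name]) c) includes cache with
          | none => none
          | some (c, m) => some (c.insert name (1 + m), 1 + m)

def pvLoopA (profiles : List (String × List String)) :
    List String → PySem.Dict String Int → List (String × Int)
  | [], cache => cache.items
  | k :: ks, cache =>
    match pvVisitA profiles (profiles.length + 2) k [] cache with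
    | none => []  -- the ValueError propagates (unreachable under Pre_)
    | some (c, _) => pvLoopA profiles ks c

def compute_profile_heights (profiles : List (String × List String)) : List (String × Int) :=
  pvLoopA profiles (profiles.map Prod.fst) PySem.Dict.empty

-- ===== PORT B =====
-- number of name occurrences in the input (keys and includes)
def pvU (profiles : List (String × List String)) : Nat :=
  (profiles.map Prod.fst ++ profiles.flatMap Prod.snd).length

-- fuel = generous bound on the number of while-loop iterations per root (totality guard only)
def pvFuelB (profiles : List (String × List String)) : Nat :=
  (pvU profiles + 2) * (pvU profiles + 2)

-- one frame = (name, pending includes, best child height so far, starting from -1)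
def pvRunB (profiles : List (String × List String)) :
    Nat → List (String × List String × Int) → PySem.Dict String Int →
    Option (PySem.Dict String Int)
  | _, [], cache => some cache
  | 0, _ :: _, _ => none
  | fuel+1, (name, pending, best) :: fs, cache =>
    match pending with
    | child :: rest =>
      match cache.get? child with
      | some v => pvRunB profiles fuel ((name, rest, max best v) :: fs) cache
      | none =>
        if child ∈ (name :: fs.map (fun f => f.1)) then none  -- raise ValueError (cycle)
        else pvRunB profiles fuel ((child, pvLk profiles child, -1) :: (name, rest, best) :: fs) cache
    | [] =>
      let height := best + 1
      let cache' := cache.insert name height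
      match fs with
      | [] => pvRunB profiles fuel [] cache'
      | (n2, p2, b2) :: fs' => pvRunB profiles fuel ((n2, p2, max b2 height) :: fs') cache'

def pvLoopB (profiles : List (String × List String)) :
    List String → PySem.Dict String Int → List (String × Int)
  | [], cache => cache.items
  | k :: ks, cache =>
    match cache.get? k with
    | some _ => pvLoopB profiles ks cache
    | none =>
      match pvRunB profiles (pvFuelB profiles) [(k, pvLk profiles k, -1)] cache with
      | none => []  -- the ValueError propagates (unreachable under Pre_)
      | some c => pvLoopB profiles ks c

def compute_profile_heights_alt (profiles : List (String × List String)) : List (String × Int) :=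
  pvLoopB profiles (profiles.map Prod.fst) PySem.Dict.empty

-- ===== PRECONDITION & SPEC =====
-- one closure step of the include graph: add every include of a member
def pvStep (profiles : List (String × List String)) (S : List String) : List String :=
  S ++ S.flatMap (pvLk profiles)

-- the names reachable from n by following one or more includes
def pvReach (profiles : List (String × List String)) (n : String) : List String :=
  (pvStep profiles)^[profiles.length] (pvLk profiles n)

-- Pre_ excludes exactly the inputs whose include graph has a cycle: there A raises ValueError.
def Pre_compute_profile_heights (profiles : List (String × List String)) : Prop :=
  ∀ a ∈ profiles.map Prod.fst, a ∉ pvReach profiles a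

instance (profiles : List (String × List String)) : Decidable (Pre_compute_profile_heights profiles) := by
  unfold Pre_compute_profile_heights; infer_instance

def pvWitness_compute_profile_heights : (List (String × List String)) :=
  [("a", ["b", "c"]), ("b", ["c"]), ("c", [])]

def Spec_compute_profile_heights (profiles : List (String × List String)) (out : List (String × Int)) : Prop := out = compute_profile_heights_alt profiles
instance (profiles : List (String × List String)) (out : List (String × Int)) : Decidable (Spec_compute_profile_heights profiles out) := by unfold Spec_compute_profile_heights; infer_instance

-- ===== CLAIM (what is proved, stated in full; the proofs are below) =====
def Claim_equal_compute_profile_heights : Prop := ∀ (profiles : List (String × List String)), Dom_compute_profile_heights profiles → Pre_compute_profile_heights profiles → Spec_compute_profile_heights profiles (compute_profile_heights profiles)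

-- ===== LEMMAS AND PROOFS =====

-- all names occurring anywhere in the input
def pvUnivL (profiles : List (String × List String)) : List String :=
  profiles.map Prod.fst ++ profiles.flatMap Prod.snd

-- ---------- small facts about pvLk / pvUnivL ----------
theorem pvMem_lk_univ {profiles : List (String × List String)} {n x : String}
    (h : x ∈ pvLk profiles n) : x ∈ pvUnivL profiles := by
  unfold pvLk at h
  cases hf : profiles.find? (fun p => p.1 == n) with
  | none => rw [hf] at h; simp at h
  | some p =>
    rw [hf] at h
    have hp : p ∈ profiles := List.mem_of_find?_eq_some hf
    unfold pvUnivL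
    exact List.mem_append_right _ (List.mem_flatMap.mpr ⟨p, hp, h⟩)

theorem pvLk_ne_nil_mem {profiles : List (String × List String)} {n : String}
    (h : pvLk profiles n ≠ []) : n ∈ profiles.map Prod.fst := by
  unfold pvLk at h
  cases hf : profiles.find? (fun p => p.1 == n) with
  | none => rw [hf] at h; simp at h
  | some p =>
    have hp : p ∈ profiles := List.mem_of_find?_eq_some hf
    have he : (p.1 == n) = true := List.find?_eq_some_iff_getElem.mp hf |>.1
    have : p.1 = n := by simpa using he
    exact this ▸ List.mem_map_of_mem hp

theorem pvLk_len_le (profiles : List (String × List String)) (n : String) :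
    (pvLk profiles n).length ≤ pvU profiles := by
  unfold pvLk pvU
  cases hf : profiles.find? (fun p => p.1 == n) with
  | none => simp
  | some p =>
    have hp : p ∈ profiles := List.mem_of_find?_eq_some hf
    have h1 : p.2.length ≤ (profiles.flatMap Prod.snd).length := by
      rw [List.length_flatMap]
      calc p.2.length = (fun q => (Prod.snd q).length) p := rfl
        _ ≤ ((profiles.map (fun q => (Prod.snd q).length)).sum) :=
          List.single_le_sum (by intro y _; exact Nat.zero_le y) _ (List.mem_map_of_mem hp)
        _ = _ := by simp
    simp only [List.length_append]
    omega

theorem pvNodup_subset_length {α : Type} [DecidableEq α] {l l' : List α}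
    (hn : l.Nodup) (hs : ∀ x ∈ l, x ∈ l') : l.length ≤ l'.length := by
  calc l.length = l.toFinset.card := (List.toFinset_card_of_nodup hn).symm
    _ ≤ l'.toFinset.card := Finset.card_le_card (fun x hx => by
        simp only [List.mem_toFinset] at *; exact hs x hx)
    _ ≤ l'.length := l'.toFinset_card_le

-- ---------- invariants of A's visit ----------
-- all cached heights are nonnegative
def pvNN (c : PySem.Dict String Int) : Prop := ∀ z v, c.get? z = some v → 0 ≤ v

-- properties of one successful visit call, relative to a fixed stack S
def pvProps (profiles : List (String × List String)) (S : List String) (x : String)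
    (c c1 : PySem.Dict String Int) (h : Int) : Prop :=
  (pvNN c → 0 ≤ h ∧ pvNN c1) ∧
  c.items.length ≤ c1.items.length ∧
  (∀ z ∈ S, c.get? z = none → c1.get? z = none) ∧
  (c.keys.Nodup → c1.keys.Nodup) ∧
  (∀ z, (c1.get? z).isSome → (c.get? z).isSome ∨ z = x ∨ z ∈ pvUnivL profiles)

theorem pvGoodFold (profiles : List (String × List String)) (S : List String)
    (visit : String → PySem.Dict String Int → Option (PySem.Dict String Int × Int))
    (Hv : ∀ x c c1 h, visit x c = some (c1, h) → pvProps profiles S x c c1 h) :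
    ∀ l c c1 m, pvMaxFold visit l c = some (c1, m) →
      (pvNN c → 0 ≤ m ∧ pvNN c1) ∧
      c.items.length ≤ c1.items.length ∧
      (∀ z ∈ S, c.get? z = none → c1.get? z = none) ∧
      (c.keys.Nodup → c1.keys.Nodup) ∧
      (∀ z, (c1.get? z).isSome → (c.get? z).isSome ∨ z ∈ l ∨ z ∈ pvUnivL profiles) := by
  intro l
  induction l with
  | nil => intro c c1 m h; simp [pvMaxFold] at h
  | cons x rest ih =>
    intro c c1 m h
    cases rest with
    | nil =>
      simp only [pvMaxFold] at h
      obtain ⟨h0, h1, h2, h3, h4⟩ := Hv x c c1 m h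
      refine ⟨h0, h1, h2, h3, ?_⟩
      intro z hz
      rcases h4 z hz with a | a | a
      · exact Or.inl a
      · exact Or.inr (Or.inl (by simp [a]))
      · exact Or.inr (Or.inr a)
    | cons y rest' =>
      simp only [pvMaxFold] at h
      cases hv : visit x c with
      | none => rw [hv] at h; simp at h
      | some p =>
        obtain ⟨ca, v⟩ := p
        rw [hv] at h
        dsimp only at h
        cases hm : pvMaxFold visit (y :: rest') ca with
        | none => rw [hm] at h; simp at h
        | some q =>
          obtain ⟨cb, m2⟩ := q
          rw [hm] at h
          dsimp only at h
          simp only [Option.some.injEq, Prod.mk.injEq] at h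
          obtain ⟨rfl, rfl⟩ := h
          obtain ⟨a0, a1, a2, a3, a4⟩ := Hv x c ca v hv
          obtain ⟨b0, b1, b2, b3, b4⟩ := ih ca cb m2 hm
          refine ⟨?_, by omega, ?_, fun hn => b3 (a3 hn), ?_⟩
          · intro hnn
            obtain ⟨av, ann⟩ := a0 hnn
            obtain ⟨bv, bnn⟩ := b0 ann
            exact ⟨le_trans av (le_max_left _ _), bnn⟩
          · intro z hz hnone
            exact b2 z hz (a2 z hz hnone)
          · intro z hz
            rcases b4 z hz with hb | hb | hb
            · rcases a4 z hb with ha | ha | ha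
              · exact Or.inl ha
              · exact Or.inr (Or.inl (by simp [ha]))
              · exact Or.inr (Or.inr ha)
            · exact Or.inr (Or.inl (by simp [hb]))
            · exact Or.inr (Or.inr hb)

theorem pvGoodV (profiles : List (String × List String)) :
    ∀ fuel name stack cache c1 h,
      pvVisitA profiles fuel name stack cache = some (c1, h) →
      pvProps profiles stack name cache c1 h := by
  intro fuel
  induction fuel with
  | zero => intro name stack cache c1 h hsome; simp [pvVisitA] at hsome
  | succ f ih =>
    intro name stack cache c1 h hsome
    simp only [pvVisitA] at hsome
    cases hc : cache.get? name with
    | some v =>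
      rw [hc] at hsome
      simp only [Option.some.injEq, Prod.mk.injEq] at hsome
      obtain ⟨rfl, rfl⟩ := hsome
      exact ⟨fun hnn => ⟨hnn name v hc, hnn⟩, le_refl _, fun z _ hz => hz, id, fun z hz => Or.inl hz⟩
    | none =>
      rw [hc] at hsome
      by_cases hmem : name ∈ stack
      · simp [hmem] at hsome
      · rw [if_neg hmem] at hsome
        have hcontains : cache.contains name = false := by
          rw [PySem.Dict.contains_eq_isSome_get? _ _, hc]; rfl
        by_cases hinc : pvLk profiles name = []
        · rw [if_pos hinc] at hsome
          simp only [Option.some.injEq, Prod.mk.injEq] at hsome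
          obtain ⟨rfl, rfl⟩ := hsome
          refine ⟨?_, ?_, ?_, ?_, ?_⟩
          · intro hnn
            refine ⟨le_refl _, ?_⟩
            intro z v hz
            rw [PySem.Dict.get?_insert _ _ _ _] at hz
            by_cases hzn : z = name
            · rw [if_pos hzn] at hz; cases hz; omega
            · rw [if_neg hzn] at hz; exact hnn z v hz
          · rw [PySem.Dict.items_insert_of_not_contains _ _ hcontains]
            simp
          · intro z hzs hznone
            have hzn : z ≠ name := fun e => hmem (e ▸ hzs)
            rw [PySem.Dict.get?_insert, if_neg hzn]; exact hznone
          · intro hn; exact PySem.Dict.nodup_keys_insert _ _ _ hn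
          · intro z hz
            rw [PySem.Dict.get?_insert _ _ _ _] at hz
            by_cases hzn : z = name
            · exact Or.inr (Or.inl hzn)
            · rw [if_neg hzn] at hz; exact Or.inl hz
        · rw [if_neg hinc] at hsome
          cases hM : pvMaxFold (fun x c => pvVisitA profiles f x (stack ++ [name]) c)
              (pvLk profiles name) cache with
          | none => rw [hM] at hsome; simp at hsome
          | some q =>
            obtain ⟨ca, m⟩ := q
            rw [hM] at hsome
            simp only [Option.some.injEq, Prod.mk.injEq] at hsome
            obtain ⟨rfl, rfl⟩ := hsome
            obtain ⟨P0, P1, P2, P3, P4⟩ :=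
              pvGoodFold profiles (stack ++ [name]) _
                (fun x c c1 h hx => ih x (stack ++ [name]) c c1 h hx)
                (pvLk profiles name) cache ca m hM
            have hca_name : ca.get? name = none :=
              P2 name (List.mem_append_right _ (List.mem_singleton_self _)) hc
            have hca_contains : ca.contains name = false := by
              rw [PySem.Dict.contains_eq_isSome_get? _ _, hca_name]; rfl
            refine ⟨?_, ?_, ?_, ?_, ?_⟩
            · intro hnn
              obtain ⟨hm0, hnn'⟩ := P0 hnn
              refine ⟨by omega, ?_⟩
              intro z v hz
              rw [PySem.Dict.get?_insert _ _ _ _] at hz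
              by_cases hzn : z = name
              · rw [if_pos hzn] at hz; cases hz; omega
              · rw [if_neg hzn] at hz; exact hnn' z v hz
            · rw [PySem.Dict.items_insert_of_not_contains _ _ hca_contains]
              simp; omega
            · intro z hzs hznone
              have hzn : z ≠ name := fun e => hmem (e ▸ hzs)
              rw [PySem.Dict.get?_insert, if_neg hzn]
              exact P2 z (List.mem_append_left _ hzs) hznone
            · intro hn; exact PySem.Dict.nodup_keys_insert _ _ _ (P3 hn)
            · intro z hz
              rw [PySem.Dict.get?_insert _ _ _ _] at hz
              by_cases hzn : z = name
              · exact Or.inr (Or.inl hzn)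
              · rw [if_neg hzn] at hz
                rcases P4 z hz with ha | ha | ha
                · exact Or.inl ha
                · exact Or.inr (Or.inr (pvMem_lk_univ ha))
                · exact Or.inr (Or.inr ha)

-- ---------- reachability ----------
theorem pvStep_subset (profiles : List (String × List String)) (S : List String) :
    ∀ x ∈ S, x ∈ pvStep profiles S := by
  intro x hx; exact List.mem_append_left _ hx

theorem pvIter_mono (profiles : List (String × List String)) {j k : Nat} (hjk : j ≤ k)
    (S : List String) : ∀ x ∈ (pvStep profiles)^[j] S, x ∈ (pvStep profiles)^[k] S := by
  induction hjk with
  | refl => intro x hx; exact hx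
  | step _ ih =>
    intro x hx
    rename_i k' _
    rw [Function.iterate_succ_apply']
    exact pvStep_subset profiles _ x (ih x hx)

theorem pvIter_step {profiles : List (String × List String)} {j : Nat} {S : List String}
    {b x : String} (hb : b ∈ (pvStep profiles)^[j] S) (hx : x ∈ pvLk profiles b) :
    x ∈ (pvStep profiles)^[j+1] S := by
  rw [Function.iterate_succ_apply']
  exact List.mem_append_right _ (List.mem_flatMap.mpr ⟨b, hb, hx⟩)

-- ---------- success of A's visit under Pre_ ----------
-- distinct keys with includes that are not yet on the stack (bounds the recursion depth)
def pvCnt (profiles : List (String × List String)) (stack : List String) : Nat :=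
  ((profiles.map Prod.fst).dedup.filter
    (fun n => decide (pvLk profiles n ≠ []) && !stack.contains n)).length

theorem pvFilter_lt {α : Type} (p q : α → Bool) (l : List α)
    (hpq : ∀ x, q x = true → p x = true) (a : α) (ha : a ∈ l) (hpa : p a = true)
    (hqa : q a = false) : (l.filter q).length < (l.filter p).length := by
  induction l with
  | nil => simp at ha
  | cons b l ih =>
    rcases List.mem_cons.mp ha with rfl | hb
    · have hle : (l.filter q).length ≤ (l.filter p).length := by
        have : ∀ x ∈ l, q x = true → p x = true := fun x _ => hpq x
        calc (l.filter q).length = l.countP q := List.countP_eq_length_filter.symm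
          _ ≤ l.countP p := List.countP_mono_left this
          _ = (l.filter p).length := List.countP_eq_length_filter
      simp only [List.filter_cons, hpa, hqa]
      simpa using Nat.lt_succ_of_le hle
    · have hlt := ih hb
      simp only [List.filter_cons]
      by_cases hqb : q b = true
      · rw [if_pos hqb, if_pos (hpq b hqb)]
        simpa using Nat.succ_lt_succ hlt
      · rw [if_neg hqb]
        cases p b
        · rw [if_neg (by simp)]
          exact hlt
        · rw [if_pos (by simp)]
          simp only [List.length_cons]
          omega

theorem pvSucFold (visit : String → PySem.Dict String Int → Option (PySem.Dict String Int × Int)) :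
    ∀ l : List String, (∀ x c, x ∈ l → (visit x c).isSome) → ∀ c, l ≠ [] →
      (pvMaxFold visit l c).isSome := by
  intro l
  induction l with
  | nil => intro _ _ h; exact absurd rfl h
  | cons x rest ih =>
    intro Hv c _
    cases rest with
    | nil => simpa [pvMaxFold] using Hv x c (by simp)
    | cons y rest' =>
      simp only [pvMaxFold]
      cases hv : visit x c with
      | none =>
        have := Hv x c (by simp)
        rw [hv] at this; simp at this
      | some p =>
        obtain ⟨ca, v⟩ := p
        dsimp only
        cases hm : pvMaxFold visit (y :: rest') ca with
        | none =>
          have := ih (fun z c' hz => Hv z c' (List.mem_cons_of_mem _ hz)) ca (by simp)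
          rw [hm] at this; simp at this
        | some q => simp

theorem pvSucV (profiles : List (String × List String))
    (hPre : Pre_compute_profile_heights profiles) :
    ∀ fuel name stack cache,
      stack.Nodup →
      (∀ s ∈ stack, pvLk profiles s ≠ []) →
      (∀ s ∈ stack, ∃ j, j < stack.length ∧ name ∈ (pvStep profiles)^[j] (pvLk profiles s)) →
      pvCnt profiles stack + 1 ≤ fuel →
      (pvVisitA profiles fuel name stack cache).isSome := by
  intro fuel
  induction fuel with
  | zero => intro name stack cache _ _ _ hfuel; omega
  | succ f ih =>
    intro name stack cache hnd hlkne hinv hfuel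
    simp only [pvVisitA]
    cases hc : cache.get? name with
    | some v => simp
    | none =>
      by_cases hmem : name ∈ stack
      · exfalso
        obtain ⟨j, hj, hreach⟩ := hinv name hmem
        have hlkname : pvLk profiles name ≠ [] := hlkne name hmem
        have hmemfst : name ∈ profiles.map Prod.fst := pvLk_ne_nil_mem hlkname
        have hstlen : stack.length ≤ profiles.length := by
          have := pvNodup_subset_length hnd
            (fun s hs => pvLk_ne_nil_mem (hlkne s hs))
          simpa using this
        have : name ∈ (pvStep profiles)^[profiles.length] (pvLk profiles name) :=
          pvIter_mono profiles (by omega) _ name hreach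
        exact hPre name hmemfst this
      · rw [if_neg hmem]
        by_cases hinc : pvLk profiles name = []
        · rw [if_pos hinc]; simp
        · rw [if_neg hinc]
          have hmemfst : name ∈ profiles.map Prod.fst := pvLk_ne_nil_mem hinc
          have hcnt : pvCnt profiles (stack ++ [name]) < pvCnt profiles stack := by
            apply pvFilter_lt _ _ _ ?_ name (List.mem_dedup.mpr hmemfst)
            · simp [hinc, hmem]
            · simp
            · intro x hx
              simp only [Bool.and_eq_true, decide_eq_true_eq, Bool.not_eq_true'] at hx ⊢
              refine ⟨hx.1, ?_⟩
              have := hx.2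
              simp only [List.contains_append] at this
              cases hxa : List.contains stack x
              · rfl
              · rw [hxa] at this; simp at this
          have hfold : (pvMaxFold (fun x c => pvVisitA profiles f x (stack ++ [name]) c)
              (pvLk profiles name) cache).isSome := by
            apply pvSucFold _ _ ?_ cache hinc
            intro x c hx
            apply ih x (stack ++ [name]) c
            · refine List.Nodup.append hnd (List.nodup_singleton _) ?_
              intro a ha hb
              simp only [List.mem_singleton] at hb
              subst hb; exact hmem ha
            · intro s hs
              rcases List.mem_append.mp hs with h' | h'
              · exact hlkne s h'
              · rw [List.mem_singleton.mp h']; exact hinc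
            · intro s hs
              rcases List.mem_append.mp hs with h' | h'
              · obtain ⟨j, hj, hr⟩ := hinv s h'
                exact ⟨j + 1, by simp; omega, pvIter_step hr hx⟩
              · rw [List.mem_singleton.mp h']
                exact ⟨0, by simp, by simpa using hx⟩
            · omega
          cases hM : pvMaxFold (fun x c => pvVisitA profiles f x (stack ++ [name]) c)
              (pvLk profiles name) cache with
          | none => rw [hM] at hfold; simp at hfold
          | some q => obtain ⟨ca, m⟩ := q; simp

-- ---------- simulation: B's machine runs A's recursion ----------
def pvPath (fs : List (String × List String × Int)) : List String :=
  (fs.map (fun f => f.1)).reverse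

theorem pvPath_cons (a : String) (p : List String) (q : Int)
    (fs : List (String × List String × Int)) :
    pvPath ((a, p, q) :: fs) = pvPath fs ++ [a] := by
  simp [pvPath]

theorem pvMem_path (x n : String) (fs : List (String × List String × Int)) :
    x ∈ pvPath fs ++ [n] ↔ x ∈ n :: fs.map (fun f => f.1) := by
  simp [pvPath, or_comm]

theorem pvLenFold (visit : String → PySem.Dict String Int → Option (PySem.Dict String Int × Int))
    (Hlen : ∀ x c c1 h, visit x c = some (c1, h) → c.items.length ≤ c1.items.length) :
    ∀ l c c1 m, pvMaxFold visit l c = some (c1, m) → c.items.length ≤ c1.items.length := by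
  intro l
  induction l with
  | nil => intro c c1 m h; simp [pvMaxFold] at h
  | cons x rest ih =>
    intro c c1 m h
    cases rest with
    | nil => exact Hlen x c c1 m (by simpa [pvMaxFold] using h)
    | cons y rest' =>
      simp only [pvMaxFold] at h
      cases hv : visit x c with
      | none => rw [hv] at h; simp at h
      | some p =>
        obtain ⟨ca, v⟩ := p
        rw [hv] at h; dsimp only at h
        cases hm : pvMaxFold visit (y :: rest') ca with
        | none => rw [hm] at h; simp at h
        | some q =>
          obtain ⟨cb, m2⟩ := q
          rw [hm] at h; dsimp only at h
          simp only [Option.some.injEq, Prod.mk.injEq] at h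
          obtain ⟨rfl, rfl⟩ := h
          exact le_trans (Hlen x c ca v hv) (ih ca cb m2 hm)

theorem pvSimFold (profiles : List (String × List String)) (S : List String)
    (visit : String → PySem.Dict String Int → Option (PySem.Dict String Int × Int))
    (HSim : ∀ x c c1 h, pvNN c → visit x c = some (c1, h) →
      ∃ k, k ≤ 1 + (c1.items.length - c.items.length) * (pvU profiles + 2) ∧
        ∀ (n : String) (r : List String) (b : Int) fs, pvPath fs ++ [n] = S →
          ∀ g, pvRunB profiles (g + k) ((n, x :: r, b) :: fs) c
             = pvRunB profiles g ((n, r, max b h) :: fs) c1)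
    (Hlen : ∀ x c c1 h, visit x c = some (c1, h) → c.items.length ≤ c1.items.length)
    (Hnn : ∀ x c c1 h, visit x c = some (c1, h) → pvNN c → pvNN c1) :
    ∀ l c c1 m, pvNN c → pvMaxFold visit l c = some (c1, m) →
      ∃ k, k ≤ l.length + (c1.items.length - c.items.length) * (pvU profiles + 2) ∧
        ∀ (n : String) (b : Int) fs, pvPath fs ++ [n] = S →
          ∀ g, pvRunB profiles (g + k) ((n, l, b) :: fs) c
             = pvRunB profiles g ((n, [], max b m) :: fs) c1 := by
  intro l
  induction l with
  | nil => intro c c1 m _ h; simp [pvMaxFold] at h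
  | cons x rest ih =>
    intro c c1 m hnn h
    cases rest with
    | nil =>
      simp only [pvMaxFold] at h
      obtain ⟨k, hk, he⟩ := HSim x c c1 m hnn h
      exact ⟨k, by simpa using hk, fun n b fs hS g => he n [] b fs hS g⟩
    | cons y rest' =>
      simp only [pvMaxFold] at h
      cases hv : visit x c with
      | none => rw [hv] at h; simp at h
      | some p =>
        obtain ⟨ca, v⟩ := p
        rw [hv] at h; dsimp only at h
        cases hm : pvMaxFold visit (y :: rest') ca with
        | none => rw [hm] at h; simp at h
        | some q =>
          obtain ⟨cb, m2⟩ := q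
          rw [hm] at h; dsimp only at h
          simp only [Option.some.injEq, Prod.mk.injEq] at h
          obtain ⟨rfl, rfl⟩ := h
          obtain ⟨k1, hk1, he1⟩ := HSim x c ca v hnn hv
          obtain ⟨k2, hk2, he2⟩ := ih ca cb m2 (Hnn x c ca v hv hnn) hm
          refine ⟨k1 + k2, ?_, ?_⟩
          · have hl1 : c.items.length ≤ ca.items.length := Hlen x c ca v hv
            have hl2 : ca.items.length ≤ cb.items.length :=
              pvLenFold visit Hlen _ ca cb m2 hm
            have hsplit : cb.items.length - c.items.length
                = (ca.items.length - c.items.length) + (cb.items.length - ca.items.length) := by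
              omega
            rw [hsplit, Nat.add_mul]
            generalize (ca.items.length - c.items.length) * (pvU profiles + 2) = Q1 at hk1 ⊢
            generalize (cb.items.length - ca.items.length) * (pvU profiles + 2) = Q2 at hk2 ⊢
            simp only [List.length_cons] at hk2 ⊢
            omega
          · intro n b fs hS g
            have e : g + (k1 + k2) = (g + k2) + k1 := by omega
            rw [e, he1 n (y :: rest') b fs hS (g + k2), he2 n (max b v) fs hS g, max_assoc]

theorem pvSimV (profiles : List (String × List String)) :
    ∀ fuel x S cache c1 h,
      pvVisitA profiles fuel x S cache = some (c1, h) →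
      pvNN cache →
      ∃ k, k ≤ 1 + (c1.items.length - cache.items.length) * (pvU profiles + 2) ∧
        ∀ (n : String) (r : List String) (b : Int) fs, pvPath fs ++ [n] = S →
          ∀ g, pvRunB profiles (g + k) ((n, x :: r, b) :: fs) cache
             = pvRunB profiles g ((n, r, max b h) :: fs) c1 := by
  intro fuel
  induction fuel with
  | zero => intro x S cache c1 h hsome _; simp [pvVisitA] at hsome
  | succ f ih =>
    intro x S cache c1 h hsome hnn
    simp only [pvVisitA] at hsome
    cases hc : cache.get? x with
    | some v =>
      rw [hc] at hsome
      simp only [Option.some.injEq, Prod.mk.injEq] at hsome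
      obtain ⟨rfl, rfl⟩ := hsome
      refine ⟨1, Nat.le_add_right _ _, ?_⟩
      intro n r b fs hS g
      simp only [pvRunB, hc]
    | none =>
      rw [hc] at hsome
      by_cases hx : x ∈ S
      · rw [if_pos hx] at hsome; simp at hsome
      · rw [if_neg hx] at hsome
        have hcontains : cache.contains x = false := by
          rw [PySem.Dict.contains_eq_isSome_get? _ _, hc]; rfl
        by_cases hinc : pvLk profiles x = []
        · rw [if_pos hinc] at hsome
          simp only [Option.some.injEq, Prod.mk.injEq] at hsome
          obtain ⟨rfl, rfl⟩ := hsome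
          have hlen : (cache.insert x 0).items.length = cache.items.length + 1 := by
            rw [PySem.Dict.items_insert_of_not_contains _ _ hcontains]; simp
          refine ⟨2, ?_, ?_⟩
          · rw [hlen]
            have e1 : cache.items.length + 1 - cache.items.length = 1 := by omega
            rw [e1, one_mul]; omega
          · intro n r b fs hS g
            have hxB : x ∉ (n :: fs.map (fun f => f.1)) := fun hxB' =>
              hx (hS ▸ (pvMem_path x n fs).mpr hxB')
            have e : g + 2 = (g + 1) + 1 := rfl
            rw [e]
            simp only [pvRunB, hc]
            rw [if_neg hxB, hinc]
            norm_num [pvRunB]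
        · rw [if_neg hinc] at hsome
          cases hM : pvMaxFold (fun y c => pvVisitA profiles f y (S ++ [x]) c)
              (pvLk profiles x) cache with
          | none => rw [hM] at hsome; simp at hsome
          | some q =>
            obtain ⟨ca, m⟩ := q
            rw [hM] at hsome
            simp only [Option.some.injEq, Prod.mk.injEq] at hsome
            obtain ⟨rfl, rfl⟩ := hsome
            obtain ⟨P0, P1, P2, P3, P4⟩ :=
              pvGoodFold profiles (S ++ [x]) _
                (fun y c c1' h' hy => pvGoodV profiles f y _ c c1' h' hy)
                (pvLk profiles x) cache ca m hM
            obtain ⟨hm0, hnnca⟩ := P0 hnn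
            have hca_none : ca.get? x = none :=
              P2 x (List.mem_append_right _ (List.mem_singleton_self _)) hc
            have hca_contains : ca.contains x = false := by
              rw [PySem.Dict.contains_eq_isSome_get? _ _, hca_none]; rfl
            obtain ⟨kM, hkM, heM⟩ :=
              pvSimFold profiles (S ++ [x])
                (fun y c => pvVisitA profiles f y (S ++ [x]) c)
                (fun y c c1' h' hnnc hy => ih y (S ++ [x]) c c1' h' hy hnnc)
                (fun y c c1' h' hy => (pvGoodV profiles f y _ c c1' h' hy).2.1)
                (fun y c c1' h' hy hnnc => ((pvGoodV profiles f y _ c c1' h' hy).1 hnnc).2)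
                (pvLk profiles x) cache ca m hnn hM
            have hlen1 : (ca.insert x (1 + m)).items.length = ca.items.length + 1 := by
              rw [PySem.Dict.items_insert_of_not_contains _ _ hca_contains]; simp
            refine ⟨kM + 2, ?_, ?_⟩
            · rw [hlen1]
              have e1 : ca.items.length + 1 - cache.items.length
                  = (ca.items.length - cache.items.length) + 1 := by omega
              rw [e1, Nat.add_mul, one_mul]
              have hlk : (pvLk profiles x).length ≤ pvU profiles := pvLk_len_le profiles x
              generalize (ca.items.length - cache.items.length) * (pvU profiles + 2) = Q at hkM ⊢
              omega
            · intro n r b fs hS g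
              have hxB : x ∉ (n :: fs.map (fun f => f.1)) := fun hxB' =>
                hx (hS ▸ (pvMem_path x n fs).mpr hxB')
              have e : g + (kM + 2) = (((g + 1) + kM)) + 1 := by omega
              rw [e]
              simp only [pvRunB, hc]
              rw [if_neg hxB]
              have hS' : pvPath ((n, r, b) :: fs) ++ [x] = S ++ [x] := by
                rw [pvPath_cons, hS]
              rw [heM x (-1) ((n, r, b) :: fs) hS' (g + 1)]
              simp only [pvRunB]
              have hmax : max (-1 : Int) m = m := max_eq_right (by omega)
              rw [hmax]
              have hcomm : m + 1 = 1 + m := by omega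
              rw [hcomm]

-- ---------- the two top-level loops agree ----------
theorem pvLoop_eq (profiles : List (String × List String))
    (hPre : Pre_compute_profile_heights profiles) :
    ∀ ks cache,
      (∀ k ∈ ks, k ∈ profiles.map Prod.fst) →
      cache.keys.Nodup →
      (∀ z, (cache.get? z).isSome → z ∈ pvUnivL profiles) →
      pvNN cache →
      pvLoopA profiles ks cache = pvLoopB profiles ks cache := by
  intro ks
  induction ks with
  | nil => intro cache _ _ _ _; rfl
  | cons k ks ih =>
    intro cache hks hnd hu hnn
    have hk : k ∈ profiles.map Prod.fst := hks k (List.mem_cons_self)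
    have hsuc : (pvVisitA profiles (profiles.length + 2) k [] cache).isSome := by
      apply pvSucV profiles hPre _ k [] cache (List.nodup_nil) (by simp) (by simp)
      have h1 : pvCnt profiles [] ≤ ((profiles.map Prod.fst).dedup).length :=
        List.length_filter_le _ _
      have h2 : ((profiles.map Prod.fst).dedup).length ≤ (profiles.map Prod.fst).length :=
        List.Sublist.length_le (List.dedup_sublist _)
      simp only [List.length_map] at h2
      omega
    obtain ⟨res, hres⟩ := Option.isSome_iff_exists.mp hsuc
    obtain ⟨c', h'⟩ := res
    simp only [pvLoopA]
    rw [hres]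
    have e2 : profiles.length + 2 = (profiles.length + 1) + 1 := rfl
    rw [e2] at hres
    rw [pvVisitA] at hres
    cases hc : cache.get? k with
    | some v =>
      rw [hc] at hres
      dsimp only at hres
      simp only [Option.some.injEq, Prod.mk.injEq] at hres
      obtain ⟨rfl, rfl⟩ := hres
      simp only [pvLoopB]
      rw [hc]
      exact ih cache (fun z hz => hks z (List.mem_cons_of_mem _ hz)) hnd hu hnn
    | none =>
      rw [hc] at hres
      dsimp only at hres
      rw [if_neg (List.not_mem_nil)] at hres
      have hFB1 : 1 ≤ pvFuelB profiles := by
        unfold pvFuelB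
        calc 1 ≤ 2 * 2 := by omega
          _ ≤ (pvU profiles + 2) * (pvU profiles + 2) :=
            Nat.mul_le_mul (by omega) (by omega)
      by_cases hinc : pvLk profiles k = []
      · rw [if_pos hinc] at hres
        simp only [Option.some.injEq, Prod.mk.injEq] at hres
        obtain ⟨rfl, rfl⟩ := hres
        simp only [pvLoopB]
        rw [hc]
        obtain ⟨fb, hfb⟩ : ∃ m, pvFuelB profiles = m + 1 :=
          ⟨pvFuelB profiles - 1, by omega⟩
        rw [hfb, hinc]
        simp only [pvRunB]
        norm_num
        apply ih
        · exact fun z hz => hks z (List.mem_cons_of_mem _ hz)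
        · exact PySem.Dict.nodup_keys_insert _ _ _ hnd
        · intro z hz
          rw [PySem.Dict.get?_insert _ _ _ _] at hz
          by_cases hzk : z = k
          · subst hzk; exact List.mem_append_left _ hk
          · rw [if_neg hzk] at hz; exact hu z hz
        · intro z v hz
          rw [PySem.Dict.get?_insert _ _ _ _] at hz
          by_cases hzk : z = k
          · rw [if_pos hzk] at hz; cases hz; omega
          · rw [if_neg hzk] at hz; exact hnn z v hz
      · rw [if_neg hinc] at hres
        cases hM : pvMaxFold (fun y c => pvVisitA profiles (profiles.length + 1) y ([] ++ [k]) c)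
            (pvLk profiles k) cache with
        | none => rw [hM] at hres; simp at hres
        | some q =>
          obtain ⟨ca, m⟩ := q
          rw [hM] at hres
          dsimp only at hres
          simp only [Option.some.injEq, Prod.mk.injEq] at hres
          obtain ⟨rfl, rfl⟩ := hres
          obtain ⟨P0, P1, P2, P3, P4⟩ :=
            pvGoodFold profiles ([] ++ [k]) _
              (fun y c c1' h' hy => pvGoodV profiles (profiles.length + 1) y _ c c1' h' hy)
              (pvLk profiles k) cache ca m hM
          obtain ⟨hm0, hnnca⟩ := P0 hnn
          have hca_none : ca.get? k = none :=
            P2 k (List.mem_append_right _ (List.mem_singleton_self _)) hc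
          obtain ⟨kM, hkM, heM⟩ :=
            pvSimFold profiles ([] ++ [k])
              (fun y c => pvVisitA profiles (profiles.length + 1) y ([] ++ [k]) c)
              (fun y c c1' h' hnnc hy =>
                pvSimV profiles (profiles.length + 1) y ([] ++ [k]) c c1' h' hy hnnc)
              (fun y c c1' h' hy =>
                (pvGoodV profiles (profiles.length + 1) y _ c c1' h' hy).2.1)
              (fun y c c1' h' hy hnnc =>
                ((pvGoodV profiles (profiles.length + 1) y _ c c1' h' hy).1 hnnc).2)
              (pvLk profiles k) cache ca m hnn hM
          -- the fuel suffices: the cache holds distinct names of the input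
          have hca_le : ca.items.length ≤ pvU profiles := by
            have hkeys : ∀ z ∈ ca.keys, z ∈ pvUnivL profiles := by
              intro z hz
              have : ca.get? z ≠ none :=
                fun e => (PySem.Dict.get?_eq_none_iff_not_mem_keys _ _).mp e hz
              rcases P4 z (Option.ne_none_iff_isSome.mp this) with ha | ha | ha
              · exact hu z ha
              · exact pvMem_lk_univ ha
              · exact ha
            have h1 : ca.keys.length ≤ (pvUnivL profiles).length :=
              pvNodup_subset_length (P3 hnd) hkeys
            have h2 : ca.keys.length = ca.items.length := by
              simp [PySem.Dict.keys]
            have h3 : (pvUnivL profiles).length = pvU profiles := rfl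
            omega
          have hfuel : kM + 1 ≤ pvFuelB profiles := by
            have hlk : (pvLk profiles k).length ≤ pvU profiles := pvLk_len_le profiles k
            have hΔ : (ca.items.length - cache.items.length) * (pvU profiles + 2)
                ≤ pvU profiles * (pvU profiles + 2) :=
              Nat.mul_le_mul_right _ (by omega)
            have hexp : pvFuelB profiles
                = pvU profiles * (pvU profiles + 2) + 2 * (pvU profiles + 2) := by
              unfold pvFuelB; ring
            generalize hQ : (ca.items.length - cache.items.length) * (pvU profiles + 2) = Q at hkM hΔ
            generalize hQU : pvU profiles * (pvU profiles + 2) = QU at hΔ hexp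
            omega
          simp only [pvLoopB]
          rw [hc]
          have hsplit : pvFuelB profiles = (pvFuelB profiles - kM) + kM := by omega
          rw [hsplit]
          rw [heM k (-1) [] (by simp [pvPath]) (pvFuelB profiles - kM)]
          obtain ⟨g1, hg1⟩ : ∃ g1, pvFuelB profiles - kM = g1 + 1 :=
            ⟨pvFuelB profiles - kM - 1, by omega⟩
          rw [hg1]
          simp only [pvRunB]
          have hmax : max (-1 : Int) m = m := max_eq_right (by omega)
          rw [hmax]
          have hcomm : m + 1 = 1 + m := by omega
          rw [hcomm]
          apply ih
          · exact fun z hz => hks z (List.mem_cons_of_mem _ hz)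
          · exact PySem.Dict.nodup_keys_insert _ _ _ (P3 hnd)
          · intro z hz
            rw [PySem.Dict.get?_insert _ _ _ _] at hz
            by_cases hzk : z = k
            · subst hzk; exact List.mem_append_left _ hk
            · rw [if_neg hzk] at hz
              rcases P4 z hz with ha | ha | ha
              · exact hu z ha
              · exact pvMem_lk_univ ha
              · exact ha
          · intro z v hz
            rw [PySem.Dict.get?_insert _ _ _ _] at hz
            by_cases hzk : z = k
            · rw [if_pos hzk] at hz; cases hz; omega
            · rw [if_neg hzk] at hz; exact hnnca z v hz

-- ===== VERDICT (by name: the statement is the Claim_ definition above) =====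
theorem compute_profile_heights_spec : Claim_equal_compute_profile_heights := by
  intro profiles _hDom hPre
  unfold Spec_compute_profile_heights compute_profile_heights compute_profile_heights_alt
  apply pvLoop_eq profiles hPre
  · intro k hk; exact hk
  · exact PySem.Dict.nodup_keys_empty
  · intro z hz; simp [PySem.Dict.get?_empty] at hz
  · intro z v hz; rw [PySem.Dict.get?_empty] at hz; cases hz
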